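-- pv_equiv track=rewrite | github.com/ssavant2/deal-meals | app/languages/sv/ingredient_matching/term_indexes.py | build_candidate_map_from_term_postings
-- ===== SOURCE A (Python) =====
-- from collections import defaultdict
--
-- def build_candidate_map_from_term_postings(
--     recipe_term_postings: dict[str, set[str]],
--     offer_term_postings: dict[str, set[str]],
-- ) -> dict[str, set[str]]:
--     candidate_map: dict[str, set[str]] = defaultdict(set)
--     for term, recipe_ids in recipe_term_postings.items():
--         offer_ids = offer_term_postings.get(term)
--         if not offer_ids:
--             continue
--         for recipe_id in recipe_ids:
--             candidate_map[recipe_id].update(offer_ids)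
--     return {recipe_id: set(offer_ids) for recipe_id, offer_ids in candidate_map.items()}
-- ===== SOURCE B (Python) =====
-- def build_candidate_map_from_term_postings(
--     recipe_term_postings: dict[str, set[str]],
--     offer_term_postings: dict[str, set[str]],
-- ) -> dict[str, set[str]]:
--     # Gather strategy: first invert the recipe postings into a per-recipe list of
--     # shared terms (keeping only terms whose offer posting is non-empty), then
--     # build each recipe's candidate set as the union of those terms' offer postings.
--     terms_by_recipe: dict[str, list[str]] = {}
--     for term, recipe_ids in recipe_term_postings.items():
--         if offer_term_postings.get(term):
--             for recipe_id in recipe_ids: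
--                 terms_by_recipe.setdefault(recipe_id, []).append(term)
--     return {
--         recipe_id: {
--             offer_id
--             for term in terms
--             for offer_id in offer_term_postings.get(term, ())
--         }
--         for recipe_id, terms in terms_by_recipe.items()
--     }
-- ===== Notes on version B (the rewrite author's own statement) =====
-- stated objective: alternative
-- what changed: Replaces A's forward per-term scatter into a defaultdict of accumulating sets by a two-phase gather: first invert the postings into a per-recipe list of shared terms (keeping only terms with a non-empty offer posting), then build each recipe's candidate set as the union of those terms' offer postings via a comprehension.
import Mathlib
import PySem

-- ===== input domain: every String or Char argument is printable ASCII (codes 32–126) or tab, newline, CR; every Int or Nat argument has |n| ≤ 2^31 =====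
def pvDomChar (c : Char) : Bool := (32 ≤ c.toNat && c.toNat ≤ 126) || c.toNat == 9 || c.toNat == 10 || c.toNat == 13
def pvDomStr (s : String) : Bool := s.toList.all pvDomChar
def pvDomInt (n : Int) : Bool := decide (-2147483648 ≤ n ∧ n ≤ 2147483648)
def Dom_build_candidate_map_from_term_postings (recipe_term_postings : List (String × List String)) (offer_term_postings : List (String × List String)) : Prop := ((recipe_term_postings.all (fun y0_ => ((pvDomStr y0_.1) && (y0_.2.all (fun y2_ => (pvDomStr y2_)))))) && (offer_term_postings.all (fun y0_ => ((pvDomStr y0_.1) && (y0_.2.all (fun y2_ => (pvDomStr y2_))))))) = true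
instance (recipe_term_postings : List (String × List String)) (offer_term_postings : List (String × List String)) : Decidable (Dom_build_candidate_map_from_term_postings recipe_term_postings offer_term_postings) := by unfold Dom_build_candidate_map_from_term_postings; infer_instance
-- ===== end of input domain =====

-- B inverts the recipe postings into a per-recipe term list, then gathers each
-- recipe's candidate set as a union over those terms (alternative decomposition).
-- Python sets/dicts are modelled as distinct-element lists / assoc lists in
-- insertion order, as per the type convention.


-- ===== PORT A =====
-- 'candidate_map[recipe_id].update(offer_ids)' on a defaultdict(set) is exactly
-- Dict.modify with default Set.empty (missing key appends at the end, existing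
-- key is updated in place); 'if not offer_ids' is none-or-empty.
def build_candidate_map_from_term_postings (recipe_term_postings : List (String × List String)) (offer_term_postings : List (String × List String)) : List (String × List String) :=
  let candidate_map : PySem.Dict String (PySem.Set String) :=
    recipe_term_postings.foldl (fun cm p =>
      match (PySem.Dict.mk offer_term_postings).get? p.1 with
      | none => cm
      | some offer_ids =>
        if offer_ids = [] then cm
        else p.2.foldl (fun cm recipe_id =>
          cm.modify recipe_id PySem.Set.empty
            (fun s => PySem.Set.update s offer_ids)) cm)
      PySem.Dict.empty
  candidate_map.items.map (fun q => (q.1, PySem.Set.ofList q.2))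

-- ===== PORT B =====
-- the set comprehension '{oid for term in terms for oid in offer.get(term, ())}'
def pvGatherOffers (offer_term_postings : List (String × List String)) (terms : List String) : PySem.Set String :=
  terms.foldl (fun s t => PySem.Set.update s ((PySem.Dict.mk offer_term_postings).getD t [])) PySem.Set.empty

-- 'terms_by_recipe.setdefault(recipe_id, []).append(term)' is Dict.modify with
-- default [] (missing key appends at the end, existing list is extended in place);
-- 'if offer_term_postings.get(term):' (truthiness) is '(get?).getD [] ≠ []'.
def build_candidate_map_from_term_postings_alt (recipe_term_postings : List (String × List String)) (offer_term_postings : List (String × List String)) : List (String × List String) :=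
  let terms_by_recipe : PySem.Dict String (List String) :=
    recipe_term_postings.foldl (fun idx p =>
      if ((PySem.Dict.mk offer_term_postings).get? p.1).getD [] = [] then idx
      else p.2.foldl (fun idx recipe_id =>
        idx.modify recipe_id [] (fun ts => ts ++ [p.1])) idx)
      PySem.Dict.empty
  terms_by_recipe.items.map (fun q => (q.1, pvGatherOffers offer_term_postings q.2))

-- ===== PRECONDITION & SPEC =====
def Spec_build_candidate_map_from_term_postings (recipe_term_postings : List (String × List String)) (offer_term_postings : List (String × List String)) (out : List (String × List String)) : Prop := out = build_candidate_map_from_term_postings_alt recipe_term_postings offer_term_postings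
instance (recipe_term_postings : List (String × List String)) (offer_term_postings : List (String × List String)) (out : List (String × List String)) : Decidable (Spec_build_candidate_map_from_term_postings recipe_term_postings offer_term_postings out) := by unfold Spec_build_candidate_map_from_term_postings; infer_instance

-- ===== CLAIM (what is proved, stated in full; the proofs are below) =====
def Claim_equal_build_candidate_map_from_term_postings : Prop := ∀ (recipe_term_postings : List (String × List String)) (offer_term_postings : List (String × List String)), Dom_build_candidate_map_from_term_postings recipe_term_postings offer_term_postings → Spec_build_candidate_map_from_term_postings recipe_term_postings offer_term_postings (build_candidate_map_from_term_postings recipe_term_postings offer_term_postings)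

-- ===== LEMMAS AND PROOFS =====

-- mapping a function over a dict's values, keys untouched
def pvMapVal (g : List String → PySem.Set String) (d : PySem.Dict String (List String)) : PySem.Dict String (PySem.Set String) :=
  PySem.Dict.mk (d.items.map (fun q => (q.1, g q.2)))

theorem pvContains_mapVal (g : List String → PySem.Set String) (d : PySem.Dict String (List String)) (k : String) :
    (pvMapVal g d).contains k = d.contains k := by
  unfold pvMapVal PySem.Dict.contains
  rw [List.any_map]
  rfl

theorem pvGet?_mapVal (g : List String → PySem.Set String) (d : PySem.Dict String (List String)) (k : String) :
    (pvMapVal g d).get? k = (d.get? k).map g := by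
  unfold pvMapVal PySem.Dict.get?
  rw [List.find?_map]
  have hpr : ((fun p : String × PySem.Set String => p.1 == k) ∘ fun q : String × List String => (q.1, g q.2)) = (fun p => p.1 == k) := rfl
  rw [hpr]
  cases List.find? (fun p => p.1 == k) d.items <;> rfl

theorem pvInsert_mapVal (g : List String → PySem.Set String) (d : PySem.Dict String (List String)) (k : String) (v : List String) :
    pvMapVal g (d.insert k v) = (pvMapVal g d).insert k (g v) := by
  cases h : d.contains k with
  | true =>
    simp only [PySem.Dict.insert, pvContains_mapVal, h, if_true]
    unfold pvMapVal
    congr 1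
    simp only [List.map_map]
    apply List.map_congr_left
    intro p _
    cases hk : (p.1 == k) <;> simp [Function.comp, hk]
  | false =>
    simp only [PySem.Dict.insert, pvContains_mapVal, h, Bool.false_eq_true, if_false]
    unfold pvMapVal
    congr 1
    simp

theorem pvGather_append (o : List (String × List String)) (ts : List String) (t : String) :
    pvGatherOffers o (ts ++ [t]) = PySem.Set.update (pvGatherOffers o ts) ((PySem.Dict.mk o).getD t []) := by
  simp [pvGatherOffers, List.foldl_append]

theorem pvModify_mapVal (o : List (String × List String)) (d : PySem.Dict String (List String)) (k : String) (t : String) :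
    pvMapVal (pvGatherOffers o) (d.modify k [] (fun ts => ts ++ [t]))
      = (pvMapVal (pvGatherOffers o) d).modify k PySem.Set.empty
          (fun s => PySem.Set.update s ((PySem.Dict.mk o).getD t [])) := by
  simp only [PySem.Dict.modify, pvInsert_mapVal, pvGather_append]
  congr 1
  simp only [PySem.Dict.getD, pvGet?_mapVal]
  cases d.get? k <;> rfl

theorem pvInnerLoop (o : List (String × List String)) (t : String) (oids : List String)
    (h : (PySem.Dict.mk o).getD t [] = oids) (rids : List String) (d : PySem.Dict String (List String)) :
    rids.foldl (fun cm recipe_id => cm.modify recipe_id PySem.Set.empty (fun s => PySem.Set.update s oids))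
        (pvMapVal (pvGatherOffers o) d)
      = pvMapVal (pvGatherOffers o) (rids.foldl (fun idx recipe_id => idx.modify recipe_id [] (fun ts => ts ++ [t])) d) := by
  induction rids generalizing d with
  | nil => rfl
  | cons r rs ih =>
    simp only [List.foldl_cons]
    rw [← ih (d.modify r [] (fun ts => ts ++ [t])), pvModify_mapVal, h]

theorem pvOuterLoop (r : List (String × List String)) (o : List (String × List String)) (d : PySem.Dict String (List String)) :
    r.foldl (fun cm p =>
        match (PySem.Dict.mk o).get? p.1 with
        | none => cm
        | some offer_ids =>
          if offer_ids = [] then cm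
          else p.2.foldl (fun cm recipe_id =>
            cm.modify recipe_id PySem.Set.empty (fun s => PySem.Set.update s offer_ids)) cm)
        (pvMapVal (pvGatherOffers o) d)
      = pvMapVal (pvGatherOffers o)
          (r.foldl (fun idx p =>
            if ((PySem.Dict.mk o).get? p.1).getD [] = [] then idx
            else p.2.foldl (fun idx recipe_id =>
              idx.modify recipe_id [] (fun ts => ts ++ [p.1])) idx) d) := by
  induction r generalizing d with
  | nil => rfl
  | cons p ps ih =>
    simp only [List.foldl_cons]
    cases hg : (PySem.Dict.mk o).get? p.1 with
    | none => simp only [Option.getD_none]; exact ih d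
    | some oids =>
      by_cases he : oids = []
      · subst he; simp only [Option.getD_some]; exact ih d
      · simp only [Option.getD_some, if_neg he]
        rw [pvInnerLoop o p.1 oids (by simp [PySem.Dict.getD, hg]) p.2 d]
        exact ih _

theorem pvNodup_update (s : PySem.Set String) (xs : List String) (h : s.Nodup) :
    (PySem.Set.update s xs).Nodup := PySem.Set.nodup_update s xs h

theorem pvNodup_gather (o : List (String × List String)) (ts : List String) :
    (pvGatherOffers o ts).Nodup := by
  suffices h : ∀ (s : PySem.Set String), s.Nodup →
      (ts.foldl (fun s t => PySem.Set.update s ((PySem.Dict.mk o).getD t [])) s).Nodup by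
    exact h PySem.Set.empty List.nodup_nil
  induction ts with
  | nil => intro s hs; exact hs
  | cons t ts ih => intro s hs; exact ih _ (pvNodup_update _ _ hs)

theorem pvOfList_gather (o : List (String × List String)) (ts : List String) :
    PySem.Set.ofList (pvGatherOffers o ts) = pvGatherOffers o ts :=
  PySem.Set.ofList_eq_self_of_nodup _ (pvNodup_gather o ts)

-- ===== VERDICT (by name: the statement is the Claim_ definition above) =====
theorem build_candidate_map_from_term_postings_spec : Claim_equal_build_candidate_map_from_term_postings := by
  intro r o _
  show _ = _
  unfold build_candidate_map_from_term_postings build_candidate_map_from_term_postings_alt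
  have hE : (PySem.Dict.empty : PySem.Dict String (PySem.Set String)) = pvMapVal (pvGatherOffers o) PySem.Dict.empty := rfl
  rw [hE, pvOuterLoop]
  simp only [pvMapVal, List.map_map]
  apply List.map_congr_left
  intro q _
  simp [Function.comp, pvOfList_gather]
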